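-- pv_equiv track=rewrite | github.com/rohitkumar7048/crypto-lab | Cryptography Lab/10-09-25 Cryptography Lab 4/13WithoutRepetn.py | is_two_distinct_primes
-- ===== SOURCE A (Python) =====
-- def is_two_distinct_primes(n):
--     count = 0
--     d = 2
--     while d*d <= n:
--         if n % d == 0:
--             count += 1
--             n //= d
--             if n % d == 0:  # repeated factor
--                 return False
--         d += 1
--     if n > 1:
--         count += 1
--     return count == 2
-- ===== SOURCE B (Python) =====
-- def is_two_distinct_primes(n):
--     # Decompose: n is a product of two distinct primes iff its smallest
--     # nontrivial factor p (p*p <= n) exists and the cofactor m = n // p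
--     # is a prime not divisible by p.
--     p = _smallest_factor(n)
--     if p is None:
--         return False
--     m = n // p
--     return m % p != 0 and _is_prime(m)
--
--
-- def _smallest_factor(n):
--     d = 2
--     while d * d <= n:
--         if n % d == 0:
--             return d
--         d += 1
--     return None
--
--
-- def _is_prime(m):
--     if m <= 1:
--         return False
--     e = 2
--     while e * e <= m:
--         if m % e == 0:
--             return False
--         e += 1
--     return True
-- ===== Notes on version B (the rewrite author's own statement) =====
-- stated objective: alternative
-- what changed: B replaces A's inline distinct-factor counting with early exit by a number-theoretic decomposition: extract the smallest factor p (if any), then separately test that the cofactor n//p is a prime not divisible by p.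
import Mathlib
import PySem

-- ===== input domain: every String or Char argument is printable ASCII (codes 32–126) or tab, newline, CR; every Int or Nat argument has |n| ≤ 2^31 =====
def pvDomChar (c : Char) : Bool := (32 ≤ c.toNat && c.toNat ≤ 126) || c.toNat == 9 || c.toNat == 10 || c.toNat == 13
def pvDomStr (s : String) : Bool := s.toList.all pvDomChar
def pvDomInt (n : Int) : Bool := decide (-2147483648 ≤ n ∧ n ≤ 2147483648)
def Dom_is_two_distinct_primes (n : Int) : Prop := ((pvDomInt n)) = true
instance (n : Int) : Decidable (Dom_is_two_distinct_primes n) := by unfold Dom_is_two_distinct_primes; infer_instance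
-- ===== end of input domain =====

-- B replaces A's inline counting of distinct factors with early exit by a decomposition:
-- extract the smallest factor p, then separately test the cofactor n//p is a prime not divisible by p.
-- (objective: alternative; same O(sqrt n) cost)

-- ===== PORT A =====
-- A's while loop (n //= d inlined); the `2 ≤ d` conjunct only makes the recursion total
-- (every call has d ≥ 2, where Python's condition `d*d <= n` is unchanged).
def pvLoopA (n d count : Int) : Bool :=
  if h : d * d ≤ n ∧ 2 ≤ d then
    if PySem.Int.mod n d = 0 then
      if PySem.Int.mod (PySem.Int.floordiv n d) d = 0 then false
      else pvLoopA (PySem.Int.floordiv n d) (d + 1) (count + 1)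
    else pvLoopA n (d + 1) count
  else
    (if n > 1 then count + 1 else count) == 2
termination_by (n + 1 - d).toNat
decreasing_by
  · obtain ⟨h1, h2⟩ := h
    have heq := PySem.Int.floordiv_mul_add_mod n d
    have hr0 := PySem.Int.mod_nonneg n (show (0:Int) < d by omega)
    have hr1 := PySem.Int.mod_lt n (show (0:Int) < d by omega)
    have hdd : d ≤ d * d := by nlinarith
    have hq : 0 < PySem.Int.floordiv n d := by nlinarith
    have hlt : PySem.Int.floordiv n d < n := by nlinarith
    omega
  · obtain ⟨h1, h2⟩ := h
    have heq := PySem.Int.floordiv_mul_add_mod n d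
    have hr0 := PySem.Int.mod_nonneg n (show (0:Int) < d by omega)
    have hr1 := PySem.Int.mod_lt n (show (0:Int) < d by omega)
    have hdd : d ≤ d * d := by nlinarith
    have hq : 0 < PySem.Int.floordiv n d := by nlinarith
    have hlt : PySem.Int.floordiv n d < n := by nlinarith
    omega

def is_two_distinct_primes (n : Int) : Bool := pvLoopA n 2 0

-- ===== PORT B =====
-- B's _smallest_factor while loop (same totalising `2 ≤ d` guard).
def pvFindFactor (n d : Int) : Option Int :=
  if h : d * d ≤ n ∧ 2 ≤ d then
    if PySem.Int.mod n d = 0 then some d else pvFindFactor n (d + 1)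
  else none
termination_by (n + 1 - d).toNat
decreasing_by
  obtain ⟨h1, h2⟩ := h
  have hd : d ≤ d * d := by nlinarith
  omega

-- B's _is_prime trial loop, scanning upward from e.
def pvIsPrimeFrom (m e : Int) : Bool :=
  if h : e * e ≤ m ∧ 2 ≤ e then
    if PySem.Int.mod m e = 0 then false else pvIsPrimeFrom m (e + 1)
  else true
termination_by (m + 1 - e).toNat
decreasing_by
  obtain ⟨h1, h2⟩ := h
  have hd : e ≤ e * e := by nlinarith
  omega

def is_two_distinct_primes_alt (n : Int) : Bool :=
  match pvFindFactor n 2 with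
  | none => false
  | some p =>
    (!(PySem.Int.mod (PySem.Int.floordiv n p) p = 0)) &&
      (decide (1 < PySem.Int.floordiv n p) && pvIsPrimeFrom (PySem.Int.floordiv n p) 2)

-- ===== PRECONDITION & SPEC =====
def Spec_is_two_distinct_primes (n : Int) (out : Bool) : Prop := out = is_two_distinct_primes_alt n
instance (n : Int) (out : Bool) : Decidable (Spec_is_two_distinct_primes n out) := by unfold Spec_is_two_distinct_primes; infer_instance

-- ===== CLAIM (what is proved, stated in full; the proofs are below) =====
def Claim_equal_is_two_distinct_primes : Prop := ∀ (n : Int), Dom_is_two_distinct_primes n → Spec_is_two_distinct_primes n (is_two_distinct_primes n)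

-- ===== LEMMAS AND PROOFS =====

-- Once count has reached 3, A's loop can only answer false.
theorem pvLoopA_ge_three (n d c : Int) (hc : 3 ≤ c) : pvLoopA n d c = false := by
  rw [pvLoopA]
  split
  · rename_i h
    split
    · split
      · rfl
      · exact pvLoopA_ge_three _ _ _ (by omega)
    · exact pvLoopA_ge_three _ _ _ hc
  · simp only [beq_eq_false_iff_ne]
    split <;> omega
termination_by (n + 1 - d).toNat
decreasing_by
  · obtain ⟨h1, h2⟩ := ‹d * d ≤ n ∧ 2 ≤ d›
    have heq := PySem.Int.floordiv_mul_add_mod n d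
    have hr0 := PySem.Int.mod_nonneg n (show (0:Int) < d by omega)
    have hr1 := PySem.Int.mod_lt n (show (0:Int) < d by omega)
    have hdd : d ≤ d * d := by nlinarith
    have hq : 0 < PySem.Int.floordiv n d := by nlinarith
    have hlt : PySem.Int.floordiv n d < n := by nlinarith
    omega
  · obtain ⟨h1, h2⟩ := ‹d * d ≤ n ∧ 2 ≤ d›
    have heq := PySem.Int.floordiv_mul_add_mod n d
    have hr0 := PySem.Int.mod_nonneg n (show (0:Int) < d by omega)
    have hr1 := PySem.Int.mod_lt n (show (0:Int) < d by omega)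
    have hdd : d ≤ d * d := by nlinarith
    have hq : 0 < PySem.Int.floordiv n d := by nlinarith
    have hlt : PySem.Int.floordiv n d < n := by nlinarith
    omega

-- With count already 2 and a nontrivial remaining n, A's loop answers false.
theorem pvLoopA_two (n d : Int) (hd : 2 ≤ d) (hn : 1 < n) : pvLoopA n d 2 = false := by
  rw [pvLoopA]
  split
  · split
    · split
      · rfl
      · exact pvLoopA_ge_three _ _ _ (by omega)
    · exact pvLoopA_two n (d + 1) (by omega) hn
  · simp [hn]
termination_by (n + 1 - d).toNat
decreasing_by
  obtain ⟨h1, h2⟩ := ‹d * d ≤ n ∧ 2 ≤ d›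
  have hdd : d ≤ d * d := by nlinarith
  omega

-- With count 1, A's remaining loop is exactly B's primality scan from the same d.
theorem pvLoopA_one (m d : Int) (hd : 2 ≤ d) (hm : 1 < m) :
    pvLoopA m d 1 = pvIsPrimeFrom m d := by
  rw [pvLoopA, pvIsPrimeFrom]
  split
  · rename_i h
    obtain ⟨h1, h2⟩ := h
    by_cases hdvd : PySem.Int.mod m d = 0
    · rw [if_pos hdvd, if_pos hdvd]
      split
      · rfl
      · have heq := PySem.Int.floordiv_mul_add_mod m d
        have hq1 : d ≤ PySem.Int.floordiv m d := by nlinarith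
        exact pvLoopA_two _ _ (by omega) (by omega)
    · rw [if_neg hdvd, if_neg hdvd]
      exact pvLoopA_one m (d + 1) (by omega) hm
  · simp [hm]
termination_by (m + 1 - d).toNat
decreasing_by
  · obtain ⟨h1, h2⟩ := ‹d * d ≤ m ∧ 2 ≤ d›
    have hdd : d ≤ d * d := by nlinarith
    omega

-- If the scan start already exceeds sqrt m, the scan accepts.
theorem pvIsPrimeFrom_of_big (m e : Int) (h : ¬ e * e ≤ m) : pvIsPrimeFrom m e = true := by
  rw [pvIsPrimeFrom]
  split
  · rename_i hh
    exact absurd hh.1 h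
  · rfl

-- Shifting the start of the primality scan across non-divisors.
theorem pvIsPrimeFrom_shift (m a b : Int) (ha : 2 ≤ a) (hab : a ≤ b)
    (hnd : ∀ e : Int, a ≤ e → e < b → PySem.Int.mod m e ≠ 0) :
    pvIsPrimeFrom m a = pvIsPrimeFrom m b := by
  by_cases hb : a = b
  · rw [hb]
  · have hlt : a < b := lt_of_le_of_ne hab hb
    rw [pvIsPrimeFrom]
    split
    · rename_i h
      rw [if_neg (hnd a le_rfl hlt)]
      exact pvIsPrimeFrom_shift m (a + 1) b (by omega) (by omega)
        (fun e he hlt' => hnd e (by omega) hlt')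
    · rename_i h
      have hm : ¬ a * a ≤ m := fun hc => h ⟨hc, ha⟩
      have hbm : ¬ b * b ≤ m := by nlinarith
      rw [pvIsPrimeFrom_of_big m b hbm]
termination_by (b - a).toNat

-- Main loop correspondence: from any scan point d with no divisor of n below d,
-- A's count-0 loop equals B's decision built from the first factor found from d.
theorem pvLoopA_zero (n d : Int) (hd : 2 ≤ d)
    (hnd : ∀ e : Int, 2 ≤ e → e < d → PySem.Int.mod n e ≠ 0) :
    pvLoopA n d 0 =
      (match pvFindFactor n d with
       | none => false
       | some p =>
         (!(PySem.Int.mod (PySem.Int.floordiv n p) p = 0)) &&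
           (decide (1 < PySem.Int.floordiv n p) && pvIsPrimeFrom (PySem.Int.floordiv n p) 2)) := by
  rw [pvLoopA]
  split
  · rename_i h
    obtain ⟨h1, h2⟩ := h
    by_cases hdvd : PySem.Int.mod n d = 0
    · rw [if_pos hdvd]
      have hf : pvFindFactor n d = some d := by
        rw [pvFindFactor, dif_pos ⟨h1, h2⟩, if_pos hdvd]
      rw [hf]
      change _ = ((!(PySem.Int.mod (PySem.Int.floordiv n d) d = 0)) &&
        (decide (1 < PySem.Int.floordiv n d) && pvIsPrimeFrom (PySem.Int.floordiv n d) 2))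
      have heq := PySem.Int.floordiv_mul_add_mod n d
      have hq1 : d ≤ PySem.Int.floordiv n d := by nlinarith
      have hmgt : 1 < PySem.Int.floordiv n d := by omega
      by_cases hrep : PySem.Int.mod (PySem.Int.floordiv n d) d = 0
      · rw [if_pos hrep]
        simp [hrep]
      · rw [if_neg hrep]
        rw [zero_add, pvLoopA_one (PySem.Int.floordiv n d) (d + 1) (by omega) hmgt]
        have hshift : pvIsPrimeFrom (PySem.Int.floordiv n d) 2
            = pvIsPrimeFrom (PySem.Int.floordiv n d) (d + 1) := by
          apply pvIsPrimeFrom_shift _ 2 (d + 1) (by omega) (by omega)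
          intro e he helt
          by_cases hed : e = d
          · rw [hed]; exact hrep
          · intro hmod
            have hedvd : e ∣ PySem.Int.floordiv n d := (PySem.Int.mod_eq_zero_iff_dvd _ e).mp hmod
            have hndvd : e ∣ n := by
              have hmn : PySem.Int.floordiv n d ∣ n := ⟨d, by omega⟩
              exact hedvd.trans hmn
            exact hnd e he (by omega) ((PySem.Int.mod_eq_zero_iff_dvd n e).mpr hndvd)
        simp [← hshift, hrep, hmgt]
    · rw [if_neg hdvd]
      have hf : pvFindFactor n d = pvFindFactor n (d + 1) := by
        rw [pvFindFactor, dif_pos ⟨h1, h2⟩, if_neg hdvd]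
      rw [hf]
      refine pvLoopA_zero n (d + 1) (by omega) ?_
      intro e he helt
      by_cases hed : e = d
      · rw [hed]; exact hdvd
      · exact hnd e he (by omega)
  · rename_i h
    have hf : pvFindFactor n d = none := by rw [pvFindFactor, dif_neg h]
    rw [hf]
    show ((if n > 1 then (0:Int) + 1 else 0) == 2) = false
    split <;> decide
termination_by (n + 1 - d).toNat
decreasing_by
  obtain ⟨h1, h2⟩ := ‹d * d ≤ n ∧ 2 ≤ d›
  have hdd : d ≤ d * d := by nlinarith
  omega

-- ===== VERDICT (by name: the statement is the Claim_ definition above) =====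
theorem is_two_distinct_primes_spec : Claim_equal_is_two_distinct_primes := by
  intro n _
  unfold Spec_is_two_distinct_primes is_two_distinct_primes is_two_distinct_primes_alt
  exact pvLoopA_zero n 2 (by omega) (by intro e he helt; omega)
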